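-- pv_equiv track=rewrite | github.com/DeepBlockDeepak/python38_practice | Review/power_set.py | filtering_solution_space
-- ===== SOURCE A (Python) =====
-- def power_set(set):
--   #length of a power set of some_set is equal to 2^(len(some_set))
--   power_set_size = 2**len(set)
--   #result will be the power set
--   result = []
--
--   for bit in range(0, power_set_size):
--     #initialize a subset list, for each element in the power set
--     sub_set = []
--
--     #binary_digit will range from 0 to len(set)
--     for binary_digit in range(len(set)):
--       #bitmask to see if a bit is 'on'
--       if((bit & (1 << binary_digit)) > 0):
--         #if it is on (not 0), append this to the powerset's element
--         sub_set.append(set[binary_digit])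
--     #append element to the powerset
--     result.append(sub_set)
--   return result
--
-- def filtering_solution_space(some_string, prune_number):
--   #solution list will store all strings which are in "some_string" and_
--   # which do not have more than 'prune_number' distinct characters
--   solution_list = []
--
--   #loop through each string-list element in the powerset
--   for subset in power_set(some_string):
--
--     #initialize empty dictionary to count distinct members within each element.
--     dictionary_counter = {}
--     #joined_string takes ex: ['a', 'b', 'a'] and spits out "aba"
--     joined_string = "".join(subset)
--     for character in joined_string:
--       #ensure that each distinct character encountered will have a count of at least 1.
--       #multiple instances of the same character will increment by 1 as they are encountered
--       dictionary_counter.setdefault(character, 0)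
--       dictionary_counter[character] += 1
--     #figure out if joined_string is in 'some_string' has only 'prune_number' distinct characters
--     if len(dictionary_counter.keys()) == prune_number and joined_string in some_string:
--       solution_list.append(joined_string)
--
--   #solution_list now contains strings which satisfy conditions
--   #now we need to prune out the longest string within solution_list
--   return solution_list
-- ===== SOURCE B (Python) =====
-- def filtering_solution_space(some_string, prune_number):
--     # build the power set by incremental doubling instead of bit masks:
--     # after processing the first k characters, subsets holds all subsets of
--     # those characters in exactly the bit-enumeration order A produces
--     subsets = [[]]
--     for c in some_string:
--         subsets = subsets + [s + [c] for s in subsets]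
--     solution_list = []
--     for subset in subsets:
--         joined = "".join(subset)
--         if len(set(joined)) == prune_number and joined in some_string:
--             solution_list.append(joined)
--     return solution_list
-- ===== Notes on version B (the rewrite author's own statement) =====
-- stated objective: simpler
-- what changed: Replaces the bitmask extraction of every subset (a 2^n by n double loop with shifts, masks and indexing, plus a per-subset counting dict) by incremental doubling of the subset list and len(set(...)) for the distinct-character count.
import Mathlib
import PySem

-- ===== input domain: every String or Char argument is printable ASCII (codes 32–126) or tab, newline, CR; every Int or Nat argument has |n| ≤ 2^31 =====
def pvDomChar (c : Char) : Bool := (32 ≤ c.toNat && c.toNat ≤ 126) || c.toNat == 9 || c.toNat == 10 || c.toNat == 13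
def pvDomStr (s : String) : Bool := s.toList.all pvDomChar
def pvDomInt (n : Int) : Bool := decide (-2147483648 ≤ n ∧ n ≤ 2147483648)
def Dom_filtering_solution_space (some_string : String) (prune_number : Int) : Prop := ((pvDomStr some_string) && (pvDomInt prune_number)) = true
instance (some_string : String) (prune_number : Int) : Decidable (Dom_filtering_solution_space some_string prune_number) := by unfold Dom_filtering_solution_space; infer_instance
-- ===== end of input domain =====

-- B replaces A's bitmask power-set enumeration and per-subset counting dict by
-- incremental doubling of the subset list and a set-size distinct count (objective: simpler).

-- ===== PORT A =====
-- power_set(set): bitmask enumeration, bit in range(2^n), inner loop over bit positions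
def pvPowerSet (cs : List Char) : List (List Char) :=
  (PySem.List.pyRange 0 ((2:Int) ^ cs.length) 1).foldl
    (fun result bit =>
      result ++ [(PySem.List.pyRange 0 (PySem.List.len cs) 1).foldl
        (fun sub_set binary_digit =>
          if PySem.Int.band bit ((1:Int) <<< binary_digit.toNat) > 0 then
            sub_set ++ [PySem.List.pyGetD cs binary_digit ' ']
          else sub_set) []]) []

def filtering_solution_space (some_string : String) (prune_number : Int) : List String :=
  (pvPowerSet some_string.toList).foldl
    (fun solution_list subset =>
      -- "".join(subset): its characters are exactly the chars of subset
      let joined_string := subset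
      let dictionary_counter := joined_string.foldl
        (fun d character =>
          let d := d.setdefault character (0:Int)   -- dictionary_counter.setdefault(character, 0)
          d.insert character (d.getD character 0 + 1))  -- dictionary_counter[character] += 1
        PySem.Dict.empty
      if PySem.List.len dictionary_counter.keys == prune_number
          && PySem.Chars.isIn joined_string some_string.toList then
        solution_list ++ [String.ofList joined_string]
      else solution_list) []

-- ===== PORT B =====
def filtering_solution_space_alt (some_string : String) (prune_number : Int) : List String :=
  let subsets := some_string.toList.foldl
    (fun subsets c => subsets ++ subsets.map (fun s => s ++ [c])) [[]]
  subsets.foldl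
    (fun solution_list subset =>
      if PySem.List.len (PySem.Set.ofList subset) == prune_number
          && PySem.Chars.isIn subset some_string.toList then
        solution_list ++ [String.ofList subset]
      else solution_list) []

-- ===== PRECONDITION & SPEC =====
def Spec_filtering_solution_space (some_string : String) (prune_number : Int) (out : List String) : Prop := out = filtering_solution_space_alt some_string prune_number
instance (some_string : String) (prune_number : Int) (out : List String) : Decidable (Spec_filtering_solution_space some_string prune_number out) := by unfold Spec_filtering_solution_space; infer_instance

-- ===== CLAIM (what is proved, stated in full; the proofs are below) =====
def Claim_equal_filtering_solution_space : Prop := ∀ (some_string : String) (prune_number : Int), Dom_filtering_solution_space some_string prune_number → Spec_filtering_solution_space some_string prune_number (filtering_solution_space some_string prune_number)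

-- ===== LEMMAS AND PROOFS =====

-- pyRange 0 k 1 is the casted List.range k
theorem pvPyRangeNat (k : Nat) :
    PySem.List.pyRange 0 (k : Int) 1 = (List.range k).map (Nat.cast) := by
  induction k with
  | zero => simp [PySem.List.pyRange]
  | succ n ih =>
    rw [PySem.List.pyRange_one_append 0 (n : Int) ((n + 1 : Nat) : Int) (by omega) (by omega),
      ih, PySem.List.pyRange_one_cons (a := (n : Int)) (by omega), List.range_succ]
    simp [PySem.List.pyRange]

-- the subset A extracts for mask m, phrased over Nat.testBit
def pvMask (cs : List Char) (m : Nat) : List Char :=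
  (List.range cs.length).foldl
    (fun sub j => if m.testBit j then sub ++ [cs.getD j ' '] else sub) []

theorem pvInner_eq_mask (cs : List Char) (m : Nat) :
    (PySem.List.pyRange 0 (PySem.List.len cs) 1).foldl
      (fun sub_set binary_digit =>
        if PySem.Int.band (m : Int) ((1:Int) <<< binary_digit.toNat) > 0 then
          sub_set ++ [PySem.List.pyGetD cs binary_digit ' ']
        else sub_set) [] = pvMask cs m := by
  rw [PySem.List.len_eq, pvPyRangeNat, List.foldl_map, pvMask]
  refine PySem.List.foldl_congr_mem _ _ _ _ (fun acc j _ => ?_)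
  simp only [Int.toNat_natCast, Int.one_shiftLeft, PySem.Int.band_natCast, Nat.and_two_pow]
  rcases h : m.testBit j with _ | _ <;>
    simp [PySem.List.pyGetD_natCast]

theorem pvPowerSet_eq_map (cs : List Char) :
    pvPowerSet cs = (List.range (2 ^ cs.length)).map (pvMask cs) := by
  unfold pvPowerSet
  rw [PySem.List.foldl_append_singleton_eq_map]
  have h2 : ((2:Int) ^ cs.length) = ((2 ^ cs.length : Nat) : Int) := by push_cast; ring
  rw [h2, pvPyRangeNat, List.map_map, List.nil_append]
  exact List.map_congr_left (fun m _ => pvInner_eq_mask cs m)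

theorem pvMask_append_lt (cs : List Char) (c : Char) (m : Nat) (hm : m < 2 ^ cs.length) :
    pvMask (cs ++ [c]) m = pvMask cs m := by
  unfold pvMask
  rw [List.length_append, List.length_singleton, List.range_succ, List.foldl_append]
  simp only [List.foldl_cons, List.foldl_nil, Nat.testBit_lt_two_pow hm, Bool.false_eq_true,
    if_false]
  refine PySem.List.foldl_congr_mem _ _ _ _ (fun acc j hj => ?_)
  rw [List.getD_append _ _ _ _ (List.mem_range.mp hj)]

theorem pvMask_append_hi (cs : List Char) (c : Char) (m : Nat) (hm : m < 2 ^ cs.length) :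
    pvMask (cs ++ [c]) (2 ^ cs.length + m) = pvMask cs m ++ [c] := by
  unfold pvMask
  rw [List.length_append, List.length_singleton, List.range_succ, List.foldl_append]
  have htop : (2 ^ cs.length + m).testBit cs.length = true := by
    rw [Nat.testBit_two_pow_add_eq, Nat.testBit_lt_two_pow hm]; rfl
  have hget : (cs ++ [c]).getD cs.length ' ' = c := by
    simp [List.getD]
  simp only [List.foldl_cons, List.foldl_nil, htop, hget, if_true]
  congr 1
  refine PySem.List.foldl_congr_mem _ _ _ _ (fun acc j hj => ?_)
  have hj' := List.mem_range.mp hj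
  rw [Nat.testBit_two_pow_add_gt hj', List.getD_append _ _ _ _ hj']

theorem pvPowerSet_snoc (cs : List Char) (c : Char) :
    pvPowerSet (cs ++ [c]) = pvPowerSet cs ++ (pvPowerSet cs).map (fun s => s ++ [c]) := by
  rw [pvPowerSet_eq_map, pvPowerSet_eq_map]
  have hlen : 2 ^ (cs ++ [c]).length = 2 ^ cs.length + 2 ^ cs.length := by
    rw [List.length_append, List.length_singleton, pow_succ]; ring
  rw [hlen, List.range_add, List.map_append, List.map_map, List.map_map]
  congr 1
  · exact List.map_congr_left (fun m hm => pvMask_append_lt cs c m (List.mem_range.mp hm))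
  · exact List.map_congr_left (fun m hm => pvMask_append_hi cs c m (List.mem_range.mp hm))

-- A's bitmask power set is B's doubling construction
theorem pvPowerSet_eq_doubling (cs : List Char) :
    pvPowerSet cs = cs.foldl (fun subsets c => subsets ++ subsets.map (fun s => s ++ [c])) [[]] := by
  induction cs using List.reverseRecOn with
  | nil => decide
  | append_singleton cs c ih => rw [List.foldl_append, ← ih, pvPowerSet_snoc]; rfl

-- the keys of A's counting dict are exactly set(subset), in first-occurrence order
theorem pvCounterKeys (l : List Char) (d : PySem.Dict Char Int) :
    (l.foldl (fun d character =>
        let d := d.setdefault character (0:Int)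
        d.insert character (d.getD character 0 + 1)) d).keys
      = PySem.Set.update d.keys l := by
  induction l generalizing d with
  | nil => rfl
  | cons c t ih =>
    rw [List.foldl_cons, ih]
    have hc : (d.setdefault c 0).contains c = true := by
      rw [PySem.Dict.contains_iff_mem_keys, PySem.Dict.keys_setdefault]
      by_cases h : d.contains c = true
      · simp only [if_pos h]; exact (PySem.Dict.contains_iff_mem_keys d c).mp h
      · simp [if_neg h]
    have hstep : ((d.setdefault c 0).insert c ((d.setdefault c 0).getD c 0 + 1)).keys
        = PySem.Set.add d.keys c := by
      rw [PySem.Dict.keys_insert_of_contains _ _ hc, PySem.Dict.keys_setdefault, PySem.Set.add]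
      by_cases h : d.contains c = true
      · rw [if_pos h, if_pos]
        rw [PySem.Set.contains_eq_listContains]
        simp
        exact (PySem.Dict.contains_iff_mem_keys d c).mp h
      · rw [if_neg h, if_neg]
        rw [PySem.Set.contains_eq_listContains]
        simp only [List.contains_iff_mem]
        intro hmem
        exact h ((PySem.Dict.contains_iff_mem_keys d c).mpr hmem)
    rw [hstep, PySem.Set.update, PySem.Set.update, List.foldl_cons]

-- ===== VERDICT (by name: the statement is the Claim_ definition above) =====
theorem filtering_solution_space_spec : Claim_equal_filtering_solution_space := by
  intro some_string prune_number _
  unfold Spec_filtering_solution_space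
  unfold filtering_solution_space filtering_solution_space_alt
  rw [pvPowerSet_eq_doubling]
  refine PySem.List.foldl_congr_mem _ _ _ _ (fun acc subset _ => ?_)
  have hkeys := pvCounterKeys subset PySem.Dict.empty
  rw [PySem.Dict.keys_empty, PySem.Set.update_nil_left] at hkeys
  simp only [hkeys]
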